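-- pv_equiv track=rewrite | github.com/keshavgaddhyan/Search | Local Seach/nqueen.py | moveOne
-- ===== SOURCE A (Python) =====
-- def countAttack(queen):
--     count = 0
--     for row1 in range( 0, len(queen) ):
--         for row2 in range( row1 + 1, len( queen ) ):
--             if queen[row1] == queen[row2]:
--                 count += 1
--             elif abs(queen[row1] - queen[row2]) == (row2 - row1):
--                 count += 1
--     return count
--
-- def moveOne(queen):
--     xqueen= list(queen)
--     x=0
--     y=0
--     b= len(queen)
--     for i in range(0,len(queen)):
--         for j in range(0,len(queen)):
--
--             if xqueen[i]==j:
--                 continue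
--             else:
--                 xqueen[i]=j
--                 a=countAttack(xqueen)
--                 if b >= a :
--                     b=a
--                     x=i
--                     y=j
--             xqueen=list(queen)
--
--     xqueen[x]=y
--     return xqueen
-- ===== SOURCE B (Python) =====
-- def _attacks(u, v, d):
--     return u == v or abs(u - v) == d
--
-- def moveOne(queen):
--     n = len(queen)
--     # total attacking pairs of the original board, counted once
--     total = 0
--     for r1 in range(n):
--         for r2 in range(r1 + 1, n):
--             if _attacks(queen[r1], queen[r2], r2 - r1):
--                 total += 1
--     best = n
--     x = 0
--     y = 0
--     for i in range(n):
--         # attacks involving row i on the original board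
--         inv = 0
--         for r in range(n):
--             if r != i and _attacks(queen[i], queen[r], abs(r - i)):
--                 inv += 1
--         base = total - inv
--         for j in range(n):
--             if queen[i] == j:
--                 continue
--             # attacks involving row i after moving it to column j
--             att = 0
--             for r in range(n):
--                 if r != i and _attacks(j, queen[r], abs(r - i)):
--                     att += 1
--             a = base + att
--             if best >= a:
--                 best = a
--                 x = i
--                 y = j
--     res = list(queen)
--     res[x] = y
--     return res
-- ===== Notes on version B (the rewrite author's own statement) =====
-- stated objective: faster
-- what changed: A recounts all attacking pairs of the whole board (O(n^2)) for each of the n^2 candidate moves; B counts the board's attacking pairs once and evaluates each candidate move as total - (attacks involving the moved row) + (attacks of the new square against the other rows), an O(n) delta per candidate.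
-- outside the precondition, e.g. on moveOne([]): A raises IndexError, B raises IndexError
import Mathlib
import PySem

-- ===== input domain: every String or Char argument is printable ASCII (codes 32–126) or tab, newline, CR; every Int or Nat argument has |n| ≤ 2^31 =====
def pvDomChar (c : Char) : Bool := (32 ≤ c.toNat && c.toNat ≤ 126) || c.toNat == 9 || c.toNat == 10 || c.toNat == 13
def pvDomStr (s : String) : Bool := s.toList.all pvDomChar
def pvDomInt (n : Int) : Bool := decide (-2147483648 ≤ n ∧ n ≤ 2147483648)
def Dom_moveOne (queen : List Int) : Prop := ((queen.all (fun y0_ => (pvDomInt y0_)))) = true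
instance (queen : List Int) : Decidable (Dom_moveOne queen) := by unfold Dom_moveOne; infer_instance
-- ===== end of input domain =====

-- B replaces A's per-candidate full O(n^2) recount with one global pair count plus an O(n)
-- per-candidate delta (attacks lost by removing the queen's row, attacks gained at the new
-- square), dropping the total cost from O(n^4) to O(n^3); objective: faster.

-- ===== PORT A =====
def countAttack (queen : List Int) : Int :=
  (PySem.List.pyRange 0 (queen.length : Int)).foldl
    (fun count row1 =>
      (PySem.List.pyRange (row1 + 1) (queen.length : Int)).foldl
        (fun count row2 =>
          if PySem.List.pyGetD queen row1 0 = PySem.List.pyGetD queen row2 0 then count + 1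
          else if |PySem.List.pyGetD queen row1 0 - PySem.List.pyGetD queen row2 0| = row2 - row1 then count + 1
          else count)
        count)
    0

def moveOne (queen : List Int) : List Int :=
  let s :=
    (PySem.List.pyRange 0 (queen.length : Int)).foldl
      (fun (s : Int × Int × Int) i =>
        (PySem.List.pyRange 0 (queen.length : Int)).foldl
          (fun (s : Int × Int × Int) j =>
            if PySem.List.pyGetD queen i 0 = j then s
            else
              let a := countAttack (PySem.List.pySetD queen i j)
              if s.1 ≥ a then (a, i, j) else s)
          s)
      ((queen.length : Int), 0, 0)
  PySem.List.pySetD queen s.2.1 s.2.2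

-- ===== PORT B =====
def pyAttacks (u v d : Int) : Bool := u == v || |u - v| == d

def moveOne_alt (queen : List Int) : List Int :=
  let n : Int := queen.length
  let total :=
    (PySem.List.pyRange 0 n).foldl
      (fun t r1 =>
        (PySem.List.pyRange (r1 + 1) n).foldl
          (fun t r2 =>
            if pyAttacks (PySem.List.pyGetD queen r1 0) (PySem.List.pyGetD queen r2 0) (r2 - r1) then t + 1 else t)
          t)
      0
  let s :=
    (PySem.List.pyRange 0 n).foldl
      (fun (s : Int × Int × Int) i =>
        let inv :=
          (PySem.List.pyRange 0 n).foldl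
            (fun c r =>
              if r ≠ i ∧ pyAttacks (PySem.List.pyGetD queen i 0) (PySem.List.pyGetD queen r 0) |r - i| then c + 1 else c)
            0
        let base := total - inv
        (PySem.List.pyRange 0 n).foldl
          (fun (s : Int × Int × Int) j =>
            if PySem.List.pyGetD queen i 0 = j then s
            else
              let att :=
                (PySem.List.pyRange 0 n).foldl
                  (fun c r =>
                    if r ≠ i ∧ pyAttacks j (PySem.List.pyGetD queen r 0) |r - i| then c + 1 else c)
                  0
              let a := base + att
              if s.1 ≥ a then (a, i, j) else s)
          s)
      (n, 0, 0)
  PySem.List.pySetD queen s.2.1 s.2.2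

-- ===== PRECONDITION & SPEC =====
-- Pre_ excludes only the empty board, on which the Python A raises IndexError at the final write.
def Pre_moveOne (queen : List Int) : Prop := queen ≠ []
instance (queen : List Int) : Decidable (Pre_moveOne queen) := by unfold Pre_moveOne; infer_instance
def pvWitness_moveOne : List Int := [0]

def Spec_moveOne (queen : List Int) (out : List Int) : Prop := out = moveOne_alt queen
instance (queen : List Int) (out : List Int) : Decidable (Spec_moveOne queen out) := by unfold Spec_moveOne; infer_instance

-- ===== CLAIM (what is proved, stated in full; the proofs are below) =====
def Claim_equal_moveOne : Prop := ∀ (queen : List Int), Dom_moveOne queen → Pre_moveOne queen → Spec_moveOne queen (moveOne queen)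

-- ===== LEMMAS AND PROOFS =====

-- the summand of A's pairwise count at index pair (r1, r2)
def qInd (q : List Int) (r1 r2 : Int) : Int :=
  if PySem.List.pyGetD q r1 0 = PySem.List.pyGetD q r2 0 then 1
  else if |PySem.List.pyGetD q r1 0 - PySem.List.pyGetD q r2 0| = r2 - r1 then 1 else 0

-- sum of f over the integer range [a, b)
def sm (a b : Int) (f : Int → Int) : Int := ((PySem.List.pyRange a b).map f).sum

-- A's countAttack as a double range sum
def sS (q : List Int) : Int :=
  sm 0 (q.length : Int) (fun r1 => sm (r1 + 1) (q.length : Int) (qInd q r1))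

-- B's per-row attack summand: attacks between row r and a queen of column v in row i
def wA (q : List Int) (i v r : Int) : Int :=
  if r ≠ i ∧ pyAttacks v (PySem.List.pyGetD q r 0) |r - i| then 1 else 0

lemma sm_congr (a b : Int) (f g : Int → Int) (h : ∀ r, a ≤ r → r < b → f r = g r) :
    sm a b f = sm a b g := by
  unfold sm
  refine congrArg List.sum (List.map_congr_left ?_)
  intro r hr
  obtain ⟨h1, h2⟩ := PySem.List.mem_pyRange_one.mp hr
  exact h r h1 h2

lemma sm_add (a b : Int) (f g : Int → Int) :
    sm a b (fun r => f r + g r) = sm a b f + sm a b g := by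
  unfold sm; exact PySem.List.sum_map_add_int _ f g

lemma sm_split3 (a b i : Int) (f : Int → Int) (h0 : a ≤ i) (h1 : i < b) :
    sm a b f = sm a i f + f i + sm (i + 1) b f := by
  unfold sm
  rw [PySem.List.pyRange_one_append a i b h0 (by omega),
      PySem.List.pyRange_one_append i (i + 1) b (by omega) (by omega),
      PySem.List.pyRange_one_singleton]
  simp [add_assoc]

lemma if_add_shape (P Q : Prop) [Decidable P] [Decidable Q] (c : Int) :
    (if P then c + 1 else if Q then c + 1 else c) =
      c + (if P then 1 else if Q then 1 else 0) := by
  split_ifs <;> ring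

lemma countAttack_eq (q : List Int) : countAttack q = sS q := by
  unfold countAttack sS
  rw [PySem.List.foldl_congr_mem _ _
      (fun c r1 => c + sm (r1 + 1) (q.length : Int) (qInd q r1)) 0 ?_]
  · rw [PySem.List.foldl_add]
    simp [sm]
  · intro acc r1 _
    rw [PySem.List.foldl_congr_mem _ _ (fun c r2 => c + qInd q r1 r2) acc ?_]
    · rw [PySem.List.foldl_add]; rfl
    · intro c r2 _
      exact if_add_shape _ _ c

lemma pyAttacks_iff (u v d : Int) : pyAttacks u v d = true ↔ (u = v ∨ |u - v| = d) := by
  unfold pyAttacks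
  simp

lemma qInd_eq_attacks (q : List Int) (r1 r2 : Int) :
    qInd q r1 r2 =
      (if pyAttacks (PySem.List.pyGetD q r1 0) (PySem.List.pyGetD q r2 0) (r2 - r1) then 1 else 0) := by
  unfold qInd
  by_cases h1 : PySem.List.pyGetD q r1 0 = PySem.List.pyGetD q r2 0 <;>
    by_cases h2 : |PySem.List.pyGetD q r1 0 - PySem.List.pyGetD q r2 0| = r2 - r1 <;>
      simp [h1, h2, pyAttacks_iff]

lemma total_eq (q : List Int) :
    (PySem.List.pyRange 0 (q.length : Int)).foldl
      (fun t r1 =>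
        (PySem.List.pyRange (r1 + 1) (q.length : Int)).foldl
          (fun t r2 =>
            if pyAttacks (PySem.List.pyGetD q r1 0) (PySem.List.pyGetD q r2 0) (r2 - r1) then t + 1 else t)
          t)
      0 = sS q := by
  unfold sS
  rw [PySem.List.foldl_congr_mem _ _
      (fun c r1 => c + sm (r1 + 1) (q.length : Int) (qInd q r1)) 0 ?_]
  · rw [PySem.List.foldl_add]
    simp [sm]
  · intro acc r1 _
    rw [PySem.List.foldl_congr_mem _ _ (fun c r2 => c + qInd q r1 r2) acc ?_]
    · rw [PySem.List.foldl_add]; rfl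
    · intro c r2 _
      dsimp only
      rw [qInd_eq_attacks]
      split_ifs <;> ring

lemma wfold_eq (q : List Int) (i v : Int) :
    (PySem.List.pyRange 0 (q.length : Int)).foldl
      (fun c r =>
        if r ≠ i ∧ pyAttacks v (PySem.List.pyGetD q r 0) |r - i| then c + 1 else c)
      0 = sm 0 (q.length : Int) (wA q i v) := by
  rw [PySem.List.foldl_congr_mem _ _ (fun c r => c + wA q i v r) 0 ?_]
  · rw [PySem.List.foldl_add]; simp [sm]
  · intro c r _
    dsimp only [wA]
    split_ifs <;> ring

-- reading an entry of the updated board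
lemma get_set (q : List Int) (i j m : Int) (h0 : 0 ≤ i) (h1 : i < (q.length : Int)) (hm : 0 ≤ m) :
    PySem.List.pyGetD (PySem.List.pySetD q i j) m 0 = if m = i then j else PySem.List.pyGetD q m 0 := by
  have hi : i = ((i.toNat : Nat) : Int) := by omega
  have hmn : m = ((m.toNat : Nat) : Int) := by omega
  rw [hi, hmn, PySem.List.pyGetD_pySetD_natCast q i.toNat m.toNat j 0 (by omega)]
  by_cases h : m.toNat = i.toNat
  · rw [if_pos h, if_pos (show ((m.toNat : Nat) : Int) = ((i.toNat : Nat) : Int) by omega)]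
  · rw [if_neg h, if_neg (show ¬ ((m.toNat : Nat) : Int) = ((i.toNat : Nat) : Int) by omega)]

lemma qInd_ne (q : List Int) (i j r1 r2 : Int) (h0 : 0 ≤ i) (h1 : i < (q.length : Int))
    (hr1 : 0 ≤ r1) (hr2 : 0 ≤ r2) (n1 : r1 ≠ i) (n2 : r2 ≠ i) :
    qInd (PySem.List.pySetD q i j) r1 r2 = qInd q r1 r2 := by
  unfold qInd
  rw [get_set q i j r1 h0 h1 hr1, get_set q i j r2 h0 h1 hr2]
  simp [n1, n2]

-- wA as an if-elif on the attack relation seen from column v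
lemma wA_eq (q : List Int) (i v r : Int) (h : r ≠ i) :
    wA q i v r =
      (if v = PySem.List.pyGetD q r 0 then 1
       else if |v - PySem.List.pyGetD q r 0| = |r - i| then (1 : Int) else 0) := by
  unfold wA
  simp only [pyAttacks_iff]
  split_ifs <;> tauto

-- pair (i, r2), r2 > i, on the board with row i moved to column v
lemma qInd_row (q : List Int) (i j v r2 : Int) (h0 : 0 ≤ i) (h1 : i < (q.length : Int))
    (hr2 : i < r2)
    (hv : PySem.List.pyGetD (PySem.List.pySetD q i j) i 0 = v) :
    qInd (PySem.List.pySetD q i j) i r2 = wA q i v r2 := by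
  unfold qInd
  rw [hv, get_set q i j r2 h0 h1 (by omega), if_neg (show ¬ r2 = i by omega),
    wA_eq q i v r2 (by omega), abs_of_pos (show (0:Int) < r2 - i by omega)]

lemma qInd_row_orig (q : List Int) (i r2 : Int) (hr2 : i < r2) :
    qInd q i r2 = wA q i (PySem.List.pyGetD q i 0) r2 := by
  unfold qInd
  rw [wA_eq q i _ r2 (by omega), abs_of_pos (show (0:Int) < r2 - i by omega)]

-- pair (r1, i), r1 < i, on the board with row i moved to column v
lemma qInd_col (q : List Int) (i j v r1 : Int) (h0 : 0 ≤ r1) (h1 : i < (q.length : Int))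
    (hr1 : r1 < i)
    (hv : PySem.List.pyGetD (PySem.List.pySetD q i j) i 0 = v) :
    qInd (PySem.List.pySetD q i j) r1 i = wA q i v r1 := by
  unfold qInd
  have ea : |r1 - i| = i - r1 := by rw [abs_of_neg (show r1 - i < 0 by omega)]; ring
  rw [hv, get_set q i j r1 (by omega) h1 h0, if_neg (show ¬ r1 = i by omega),
    wA_eq q i v r1 (by omega), ea]
  have h2 : |PySem.List.pyGetD q r1 0 - v| = |v - PySem.List.pyGetD q r1 0| := abs_sub_comm _ _
  have h1' : (PySem.List.pyGetD q r1 0 = v) ↔ (v = PySem.List.pyGetD q r1 0) := eq_comm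
  rw [h2]
  simp only [h1']

lemma qInd_col_orig (q : List Int) (i r1 : Int) (hr1 : r1 < i) :
    qInd q r1 i = wA q i (PySem.List.pyGetD q i 0) r1 := by
  have ea : |r1 - i| = i - r1 := by rw [abs_of_neg (show r1 - i < 0 by omega)]; ring
  unfold qInd
  rw [wA_eq q i _ r1 (by omega), ea]
  have h2 : |PySem.List.pyGetD q r1 0 - PySem.List.pyGetD q i 0| = |PySem.List.pyGetD q i 0 - PySem.List.pyGetD q r1 0| := abs_sub_comm _ _
  have h1' : (PySem.List.pyGetD q r1 0 = PySem.List.pyGetD q i 0) ↔ (PySem.List.pyGetD q i 0 = PySem.List.pyGetD q r1 0) := eq_comm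
  rw [h2]
  simp only [h1']

lemma wA_self (q : List Int) (i v : Int) : wA q i v i = 0 := by
  simp [wA]

-- KEY LEMMA: moving row i to column j changes the pair count by (new row attacks − old row attacks)
lemma sS_set (q : List Int) (i j : Int) (h0 : 0 ≤ i) (h1 : i < (q.length : Int)) :
    sS (PySem.List.pySetD q i j) =
      sS q - sm 0 (q.length : Int) (wA q i (PySem.List.pyGetD q i 0)) +
        sm 0 (q.length : Int) (wA q i j) := by
  have hvi : PySem.List.pyGetD (PySem.List.pySetD q i j) i 0 = j := by
    rw [get_set q i j i h0 h1 h0, if_pos rfl]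
  have e1 : sS (PySem.List.pySetD q i j)
      = sm 0 i (fun r1 => sm (r1 + 1) (q.length : Int) (qInd (PySem.List.pySetD q i j) r1))
        + sm (i + 1) (q.length : Int) (qInd (PySem.List.pySetD q i j) i)
        + sm (i + 1) (q.length : Int)
            (fun r1 => sm (r1 + 1) (q.length : Int) (qInd (PySem.List.pySetD q i j) r1)) := by
    unfold sS
    simp only [PySem.List.length_pySetD]
    exact sm_split3 0 _ i _ h0 h1
  have e2 : sS q
      = sm 0 i (fun r1 => sm (r1 + 1) (q.length : Int) (qInd q r1))
        + sm (i + 1) (q.length : Int) (qInd q i)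
        + sm (i + 1) (q.length : Int)
            (fun r1 => sm (r1 + 1) (q.length : Int) (qInd q r1)) := by
    unfold sS
    exact sm_split3 0 _ i _ h0 h1
  have e3 : sm (i + 1) (q.length : Int)
        (fun r1 => sm (r1 + 1) (q.length : Int) (qInd (PySem.List.pySetD q i j) r1))
      = sm (i + 1) (q.length : Int)
        (fun r1 => sm (r1 + 1) (q.length : Int) (qInd q r1)) := by
    apply sm_congr
    intro r1 ha hb
    apply sm_congr
    intro r2 hc hd
    exact qInd_ne q i j r1 r2 h0 h1 (by omega) (by omega) (by omega) (by omega)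
  have e4 : sm (i + 1) (q.length : Int) (qInd (PySem.List.pySetD q i j) i)
      = sm (i + 1) (q.length : Int) (wA q i j) := by
    apply sm_congr
    intro r2 ha hb
    exact qInd_row q i j j r2 h0 h1 (by omega) hvi
  have e5 : sm (i + 1) (q.length : Int) (qInd q i)
      = sm (i + 1) (q.length : Int) (wA q i (PySem.List.pyGetD q i 0)) := by
    apply sm_congr
    intro r2 ha hb
    exact qInd_row_orig q i r2 (by omega)
  have e6 : sm 0 i (fun r1 =>
        sm (r1 + 1) (q.length : Int) (qInd (PySem.List.pySetD q i j) r1)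
          + wA q i (PySem.List.pyGetD q i 0) r1)
      = sm 0 i (fun r1 =>
        sm (r1 + 1) (q.length : Int) (qInd q r1) + wA q i j r1) := by
    apply sm_congr
    intro r1 ha hb
    have hs' : sm (r1 + 1) (q.length : Int) (qInd (PySem.List.pySetD q i j) r1)
        = sm (r1 + 1) i (qInd (PySem.List.pySetD q i j) r1)
          + qInd (PySem.List.pySetD q i j) r1 i
          + sm (i + 1) (q.length : Int) (qInd (PySem.List.pySetD q i j) r1) :=
      sm_split3 _ _ i _ (by omega) h1
    have hs : sm (r1 + 1) (q.length : Int) (qInd q r1)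
        = sm (r1 + 1) i (qInd q r1) + qInd q r1 i
          + sm (i + 1) (q.length : Int) (qInd q r1) :=
      sm_split3 _ _ i _ (by omega) h1
    have hseg1 : sm (r1 + 1) i (qInd (PySem.List.pySetD q i j) r1)
        = sm (r1 + 1) i (qInd q r1) := by
      apply sm_congr
      intro r2 hc hd
      exact qInd_ne q i j r1 r2 h0 h1 (by omega) (by omega) (by omega) (by omega)
    have hseg2 : sm (i + 1) (q.length : Int) (qInd (PySem.List.pySetD q i j) r1)
        = sm (i + 1) (q.length : Int) (qInd q r1) := by
      apply sm_congr
      intro r2 hc hd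
      exact qInd_ne q i j r1 r2 h0 h1 (by omega) (by omega) (by omega) (by omega)
    have hmidn : qInd (PySem.List.pySetD q i j) r1 i = wA q i j r1 :=
      qInd_col q i j j r1 ha h1 hb hvi
    have hmido : qInd q r1 i = wA q i (PySem.List.pyGetD q i 0) r1 :=
      qInd_col_orig q i r1 hb
    linarith
  have e6a : sm 0 i (fun r1 =>
        sm (r1 + 1) (q.length : Int) (qInd (PySem.List.pySetD q i j) r1)
          + wA q i (PySem.List.pyGetD q i 0) r1)
      = sm 0 i (fun r1 => sm (r1 + 1) (q.length : Int) (qInd (PySem.List.pySetD q i j) r1))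
        + sm 0 i (wA q i (PySem.List.pyGetD q i 0)) :=
    sm_add 0 i _ _
  have e6b : sm 0 i (fun r1 => sm (r1 + 1) (q.length : Int) (qInd q r1) + wA q i j r1)
      = sm 0 i (fun r1 => sm (r1 + 1) (q.length : Int) (qInd q r1)) + sm 0 i (wA q i j) :=
    sm_add 0 i _ _
  have e7 : sm 0 (q.length : Int) (wA q i (PySem.List.pyGetD q i 0))
      = sm 0 i (wA q i (PySem.List.pyGetD q i 0)) + wA q i (PySem.List.pyGetD q i 0) i
        + sm (i + 1) (q.length : Int) (wA q i (PySem.List.pyGetD q i 0)) :=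
    sm_split3 0 _ i _ h0 h1
  have e8 : sm 0 (q.length : Int) (wA q i j)
      = sm 0 i (wA q i j) + wA q i j i + sm (i + 1) (q.length : Int) (wA q i j) :=
    sm_split3 0 _ i _ h0 h1
  have w1 : wA q i (PySem.List.pyGetD q i 0) i = 0 := wA_self q i _
  have w2 : wA q i j i = 0 := wA_self q i _
  linarith

-- the two search loops compute the same state
lemma loops_eq (q : List Int) :
    (PySem.List.pyRange 0 (q.length : Int)).foldl
      (fun (s : Int × Int × Int) i =>
        (PySem.List.pyRange 0 (q.length : Int)).foldl
          (fun (s : Int × Int × Int) j =>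
            if PySem.List.pyGetD q i 0 = j then s
            else
              let a := countAttack (PySem.List.pySetD q i j)
              if s.1 ≥ a then (a, i, j) else s)
          s)
      ((q.length : Int), 0, 0)
    = (PySem.List.pyRange 0 (q.length : Int)).foldl
      (fun (s : Int × Int × Int) i =>
        let inv :=
          (PySem.List.pyRange 0 (q.length : Int)).foldl
            (fun c r =>
              if r ≠ i ∧ pyAttacks (PySem.List.pyGetD q i 0) (PySem.List.pyGetD q r 0) |r - i| then c + 1 else c)
            0
        let base :=
          ((PySem.List.pyRange 0 (q.length : Int)).foldl
            (fun t r1 =>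
              (PySem.List.pyRange (r1 + 1) (q.length : Int)).foldl
                (fun t r2 =>
                  if pyAttacks (PySem.List.pyGetD q r1 0) (PySem.List.pyGetD q r2 0) (r2 - r1) then t + 1 else t)
                t)
            0) - inv
        (PySem.List.pyRange 0 (q.length : Int)).foldl
          (fun (s : Int × Int × Int) j =>
            if PySem.List.pyGetD q i 0 = j then s
            else
              let att :=
                (PySem.List.pyRange 0 (q.length : Int)).foldl
                  (fun c r =>
                    if r ≠ i ∧ pyAttacks j (PySem.List.pyGetD q r 0) |r - i| then c + 1 else c)
                  0
              let a := base + att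
              if s.1 ≥ a then (a, i, j) else s)
          s)
      ((q.length : Int), 0, 0) := by
  apply PySem.List.foldl_congr_mem
  intro s i hi
  obtain ⟨hi0, hi1⟩ := PySem.List.mem_pyRange_one.mp hi
  dsimp only
  apply PySem.List.foldl_congr_mem
  intro t j hj
  dsimp only
  by_cases hskip : PySem.List.pyGetD q i 0 = j
  · rw [if_pos hskip, if_pos hskip]
  · rw [if_neg hskip, if_neg hskip, countAttack_eq, sS_set q i j hi0 hi1,
      ← total_eq q, ← wfold_eq q i (PySem.List.pyGetD q i 0), ← wfold_eq q i j]

lemma fold_eq (q : List Int) : moveOne q = moveOne_alt q := by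
  unfold moveOne moveOne_alt
  dsimp only
  rw [loops_eq]

-- ===== VERDICT (by name: the statement is the Claim_ definition above) =====
theorem moveOne_spec : Claim_equal_moveOne := by
  intro queen _ _
  unfold Spec_moveOne
  exact fold_eq queen
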